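-- pv_equiv track=rewrite | github.com/vger-6/cr4te | html_builder.py | _group_tags_by_category
-- ===== SOURCE A (Python) =====
-- from typing import List, Dict, Any, Optional, Iterable
-- from collections import defaultdict
--
-- def _group_tags_by_category(tags: Iterable[str]) -> Dict[str, List[str]]:
--     """
--     Groups tags by category. Tags with the format 'Category: Label' are grouped under 'Category'.
--     Tags without a colon are grouped under the default 'Tag' category.
--
--     Returns:
--         A dictionary sorted by category name and tag name.
--     """
--     grouped: Dict[str, Set[str]] = defaultdict(set)
--
--     for tag in tags:
--         if ":" in tag:
--             category, label = tag.split(":", 1)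
--             grouped[category.strip()].add(label.strip())
--         else:
--             grouped["Tag"].add(tag.strip())
--
--     return {category: sorted(grouped[category]) for category in sorted(grouped)}
-- ===== SOURCE B (Python) =====
-- def _group_tags_by_category(tags):
--     def parse(t):
--         if ":" in t:
--             parts = t.split(":", 1)
--             return parts[0].strip(), parts[1].strip()
--         return "Tag", t.strip()
--
--     pairs = [parse(t) for t in tags]
--     return {c: sorted({l for cc, l in pairs if cc == c})
--             for c in sorted({c for c, _ in pairs})}
-- ===== Notes on version B (the rewrite author's own statement) =====
-- stated objective: alternative
-- what changed: Replaces the defaultdict-of-sets mutation pass (group first, then sort each group) with a pure parse-once pair list followed by per-category set comprehensions over it: no dict is built, each sorted category re-filters the parsed pairs.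
import Mathlib
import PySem

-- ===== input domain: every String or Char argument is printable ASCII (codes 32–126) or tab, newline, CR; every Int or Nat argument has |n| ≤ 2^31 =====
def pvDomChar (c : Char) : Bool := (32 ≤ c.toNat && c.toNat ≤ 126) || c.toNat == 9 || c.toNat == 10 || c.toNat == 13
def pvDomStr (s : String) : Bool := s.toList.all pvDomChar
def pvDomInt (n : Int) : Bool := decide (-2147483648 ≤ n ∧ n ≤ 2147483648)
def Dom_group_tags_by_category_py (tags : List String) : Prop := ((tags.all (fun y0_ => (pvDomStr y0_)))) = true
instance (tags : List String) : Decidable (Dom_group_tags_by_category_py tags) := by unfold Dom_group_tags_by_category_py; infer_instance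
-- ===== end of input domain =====

-- B replaces A's defaultdict-of-sets mutation pass with a pure parse-once pair list and
-- per-category set comprehensions over it (alternative decomposition, no speed claim).


-- ===== PORT A =====
-- for tag in tags: if ":" in tag: category, label = tag.split(":", 1); grouped[category.strip()].add(label.strip())
--                  else: grouped["Tag"].add(tag.strip())
-- (tuple unpacking ported as positional access parts[0]/parts[1]; split(":",1) always yields 2 parts when ":" in tag)
def group_tags_by_category_py (tags : List String) : List (String × List String) :=
  let grouped : PySem.Dict String (PySem.Set String) :=
    tags.foldl (fun d tag =>
      if PySem.Str.isIn ":" tag then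
        let parts := (PySem.Str.splitMax? tag ":" 1).getD []
        d.modify (PySem.Str.strip (parts.getD 0 "")) []
          (fun s => PySem.Set.add s (PySem.Str.strip (parts.getD 1 "")))
      else
        d.modify "Tag" [] (fun s => PySem.Set.add s (PySem.Str.strip tag)))
      PySem.Dict.empty
  (PySem.List.sorted grouped.keys (fun x => x) false).map
    (fun c => (c, PySem.List.sorted (grouped.getD c []) (fun x => x) false))

-- ===== PORT B =====
-- def parse(t): if ":" in t: parts = t.split(":", 1); return parts[0].strip(), parts[1].strip()
--               return "Tag", t.strip()
def pvParse (t : String) : String × String :=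
  if PySem.Str.isIn ":" t then
    let parts := (PySem.Str.splitMax? t ":" 1).getD []
    (PySem.Str.strip (parts.getD 0 ""), PySem.Str.strip (parts.getD 1 ""))
  else ("Tag", PySem.Str.strip t)

-- {c: sorted({l for cc, l in pairs if cc == c}) for c in sorted({c for c, _ in pairs})}
def group_tags_by_category_py_alt (tags : List String) : List (String × List String) :=
  let pairs := tags.map pvParse
  (PySem.List.sorted (PySem.Set.ofList (pairs.map (·.1))) (fun x => x) false).map
    (fun c => (c, PySem.List.sorted
        (PySem.Set.ofList ((pairs.filter (fun p => p.1 == c)).map (·.2))) (fun x => x) false))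

-- ===== PRECONDITION & SPEC =====
def Spec_group_tags_by_category_py (tags : List String) (out : List (String × List String)) : Prop := out = group_tags_by_category_py_alt tags
instance (tags : List String) (out : List (String × List String)) : Decidable (Spec_group_tags_by_category_py tags out) := by unfold Spec_group_tags_by_category_py; infer_instance

-- ===== CLAIM (what is proved, stated in full; the proofs are below) =====
def Claim_equal_group_tags_by_category_py : Prop := ∀ (tags : List String), Dom_group_tags_by_category_py tags → Spec_group_tags_by_category_py tags (group_tags_by_category_py tags)

-- ===== LEMMAS AND PROOFS =====

-- A's loop body, branch by branch, is exactly "modify at the parsed category, adding the parsed label"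
theorem pv_bodyA_eq (d : PySem.Dict String (PySem.Set String)) (tag : String) :
    (if PySem.Str.isIn ":" tag then
        let parts := (PySem.Str.splitMax? tag ":" 1).getD []
        d.modify (PySem.Str.strip (parts.getD 0 "")) []
          (fun s => PySem.Set.add s (PySem.Str.strip (parts.getD 1 "")))
      else
        d.modify "Tag" [] (fun s => PySem.Set.add s (PySem.Str.strip tag)))
    = d.modify (pvParse tag).1 [] (fun s => PySem.Set.add s (pvParse tag).2) := by
  unfold pvParse
  split <;> rfl

-- the value accumulated at category c by the modify loop
theorem pv_getD_fold (tags : List String) (d : PySem.Dict String (PySem.Set String)) (c : String) :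
    (tags.foldl (fun d t => d.modify (pvParse t).1 []
        (fun s => PySem.Set.add s (pvParse t).2)) d).getD c []
    = ((tags.map pvParse).filter (fun p => p.1 == c)).foldl
        (fun s p => PySem.Set.add s p.2) (d.getD c []) := by
  induction tags generalizing d with
  | nil => rfl
  | cons t ts ih =>
      simp only [List.foldl_cons, List.map_cons, List.filter_cons]
      rw [ih]
      by_cases h : (pvParse t).1 = c
      · simp [h]
      · have : ((pvParse t).1 == c) = false := by simp [h]
        simp [this, PySem.Dict.getD_modify, Ne.symm h]

theorem group_tags_eq (tags : List String) :
    group_tags_by_category_py tags = group_tags_by_category_py_alt tags := by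
  have hbody : (fun (d : PySem.Dict String (PySem.Set String)) tag =>
      if PySem.Str.isIn ":" tag then
        let parts := (PySem.Str.splitMax? tag ":" 1).getD []
        d.modify (PySem.Str.strip (parts.getD 0 "")) []
          (fun s => PySem.Set.add s (PySem.Str.strip (parts.getD 1 "")))
      else
        d.modify "Tag" [] (fun s => PySem.Set.add s (PySem.Str.strip tag)))
      = (fun d t => d.modify (pvParse t).1 [] (fun s => PySem.Set.add s (pvParse t).2)) := by
    funext d tag; exact pv_bodyA_eq d tag
  have hkeys : (tags.foldl (fun d t => d.modify (pvParse t).1 []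
      (fun s => PySem.Set.add s (pvParse t).2)) PySem.Dict.empty).keys
      = PySem.Set.ofList ((tags.map pvParse).map (·.1)) := by
    rw [PySem.Dict.keys_foldl_modify_key]
    simp [PySem.Set.update, PySem.Set.ofList_eq_foldl, PySem.Dict.keys_empty, List.foldl_map]
  simp only [group_tags_by_category_py, group_tags_by_category_py_alt, hbody, hkeys]
  apply List.map_congr_left
  intro c _
  have hget := pv_getD_fold tags PySem.Dict.empty c
  rw [PySem.Dict.getD_empty] at hget
  rw [hget, PySem.Set.ofList_eq_foldl, List.foldl_map]

-- ===== VERDICT (by name: the statement is the Claim_ definition above) =====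
theorem group_tags_by_category_py_spec : Claim_equal_group_tags_by_category_py := by
  intro tags _
  unfold Spec_group_tags_by_category_py
  exact group_tags_eq tags
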